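-- pv_equiv track=rewrite | github.com/ammarfitwalla/Dewa | pdfs/Projects/LV/Shape_extraction_Output/Output_CSV/Text_CSV/nn_consolidated.py | get_spnt
-- ===== SOURCE A (Python) =====
-- def get_spnt(fndlst):
--     tl = []
--     for i in fndlst:
--         tl.append(i[0])
--     stmp_elmnt = min(tl)
--     for i in fndlst:
--         if stmp_elmnt == i[0]:
--             frstv, scndv = i[1], i[2]
--     return frstv, scndv
-- ===== SOURCE B (Python) =====
-- def get_spnt(fndlst):
--     mn, frstv, scndv = fndlst[0]
--     for x, y, z in fndlst[1:]:
--         if x <= mn: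
--             mn, frstv, scndv = x, y, z
--     return frstv, scndv
-- ===== Notes on version B (the rewrite author's own statement) =====
-- stated objective: simpler
-- what changed: Replaced A's three passes (collect firsts, take min, rescan for the last matching tuple) by one pass that keeps a running minimum and, via <=, the last tied tuple's second/third fields.
-- outside the precondition, e.g. on get_spnt([]): A raises ValueError, B raises IndexError
import Mathlib
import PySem

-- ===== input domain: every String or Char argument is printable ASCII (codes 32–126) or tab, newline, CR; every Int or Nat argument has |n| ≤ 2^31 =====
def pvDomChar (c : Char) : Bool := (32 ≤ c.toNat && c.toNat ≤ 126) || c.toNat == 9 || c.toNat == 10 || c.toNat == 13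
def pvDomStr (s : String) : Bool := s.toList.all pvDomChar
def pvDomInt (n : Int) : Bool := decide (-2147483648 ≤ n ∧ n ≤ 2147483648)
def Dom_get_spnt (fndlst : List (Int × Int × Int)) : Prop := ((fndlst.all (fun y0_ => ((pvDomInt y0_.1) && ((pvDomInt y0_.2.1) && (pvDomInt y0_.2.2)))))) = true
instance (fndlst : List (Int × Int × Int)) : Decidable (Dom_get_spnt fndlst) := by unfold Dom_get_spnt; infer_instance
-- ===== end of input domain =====

-- B does the min-selection in ONE pass (running minimum, '<=' keeps the last tie) instead of A's
-- three passes; return value only, same tie-breaking. Pre_ excludes [] where A raises ValueError.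

-- ===== PORT A =====
def get_spnt (fndlst : List (Int × Int × Int)) : Int × Int :=
  let tl := fndlst.foldl (fun acc i => acc ++ [i.1]) []
  match PySem.List.min? tl (fun x => x) with
  | none => (0, 0)   -- min([]) raises ValueError: excluded by Pre_get_spnt
  | some m =>
    match fndlst.foldl (fun acc i => if m == i.1 then some (i.2.1, i.2.2) else acc)
        (none : Option (Int × Int)) with
    | some p => p
    | none => (0, 0)  -- frstv unbound: unreachable for nonempty fndlst

-- ===== PORT B =====
def get_spnt_alt (fndlst : List (Int × Int × Int)) : Int × Int :=
  match fndlst with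
  | [] => (0, 0)     -- fndlst[0] raises IndexError: excluded by Pre_get_spnt
  | h :: t =>
    let r := t.foldl (fun s i => if i.1 ≤ s.1 then i else s) h
    (r.2.1, r.2.2)

-- ===== PRECONDITION & SPEC =====
-- A raises ValueError (min of empty sequence) on []: excluded.
def Pre_get_spnt (fndlst : List (Int × Int × Int)) : Prop := fndlst ≠ []
instance (fndlst : List (Int × Int × Int)) : Decidable (Pre_get_spnt fndlst) := by unfold Pre_get_spnt; infer_instance
def pvWitness_get_spnt : (List (Int × Int × Int)) := [(1, 2, 3)]
def Spec_get_spnt (fndlst : List (Int × Int × Int)) (out : Int × Int) : Prop := out = get_spnt_alt fndlst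
instance (fndlst : List (Int × Int × Int)) (out : Int × Int) : Decidable (Spec_get_spnt fndlst out) := by unfold Spec_get_spnt; infer_instance

-- ===== CLAIM (what is proved, stated in full; the proofs are below) =====
def Claim_equal_get_spnt : Prop := ∀ (fndlst : List (Int × Int × Int)), Dom_get_spnt fndlst → Pre_get_spnt fndlst → Spec_get_spnt fndlst (get_spnt fndlst)

-- ===== LEMMAS AND PROOFS =====

-- A's scan-for-the-minimum over t, started from the state A has after its head element, equals
-- B's single running-minimum pass: key induction, generalizing both the head and the dead accumulator.
theorem scanA_eq_runmin (m : Int) :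
    ∀ (t : List (Int × Int × Int)) (h : Int × Int × Int) (acc : Option (Int × Int)),
      m = (t.map (·.1)).foldl min h.1 →
      t.foldl (fun a i => if m == i.1 then some (i.2.1, i.2.2) else a)
        (if m == h.1 then some (h.2.1, h.2.2) else acc)
      = some ((t.foldl (fun s i => if i.1 ≤ s.1 then i else s) h).2.1,
              (t.foldl (fun s i => if i.1 ≤ s.1 then i else s) h).2.2) := by
  intro t
  induction t with
  | nil =>
    intro h acc hm
    simp at hm
    simp [hm]
  | cons x t ih =>
    intro h acc hm
    simp only [List.map_cons, List.foldl_cons] at hm ⊢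
    by_cases hx : x.1 ≤ h.1
    · -- B takes x as new state; the new running minimum is x.1
      rw [if_pos hx]
      have hmin : min h.1 x.1 = x.1 := by omega
      rw [hmin] at hm
      -- A's accumulator after h, x is (if m == x.1 then some x.2 else (if m == h.1 then … else acc))
      have := ih x (if m == h.1 then some (h.2.1, h.2.2) else acc) hm
      exact this
    · rw [if_neg hx]
      have hmin : min h.1 x.1 = h.1 := by omega
      rw [hmin] at hm
      -- m ≤ h.1 < x.1, so the x-step cannot fire unless m == h.1 too; repack the accumulator
      have hle : m ≤ h.1 := by
        subst hm
        have := (PySem.List.foldl_min_le (t.map (·.1)) h.1).1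
        exact this
      by_cases hmx : m = x.1
      · omega
      · have hbx : (m == x.1) = false := by simp [hmx]
        rw [hbx]
        simp only [Bool.false_eq_true, if_false]
        exact ih h acc hm

-- the first loop of A builds the list of first components
theorem tl_eq_map : ∀ (l : List (Int × Int × Int)) (acc : List Int),
    l.foldl (fun a i => a ++ [i.1]) acc = acc ++ l.map (·.1) := by
  intro l
  induction l with
  | nil => simp
  | cons x t ih => intro acc; simp [ih]

-- ===== VERDICT (by name: the statement is the Claim_ definition above) =====
theorem get_spnt_spec : Claim_equal_get_spnt := by
  intro fndlst _ hpre
  unfold Spec_get_spnt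
  match fndlst with
  | [] => exact absurd rfl hpre
  | h :: t =>
    unfold get_spnt get_spnt_alt
    rw [tl_eq_map]
    simp only [List.nil_append, List.map_cons, PySem.List.min?_id_cons]
    rw [List.foldl_cons]
    rw [scanA_eq_runmin ((t.map (·.1)).foldl min h.1) t h none rfl]
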